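-- pv_equiv track=rewrite | github.com/peterbx9/code-mapper | src/code_mapper/connectivity.py | _bfs_backward
-- ===== SOURCE A (Python) =====
-- from collections import defaultdict, deque
--
-- def _bfs_backward(start_ids: set, reverse_graph: dict) -> set:
--     visited = set()
--     queue = deque(start_ids)
--     while queue:
--         current = queue.popleft()
--         if current in visited:
--             continue
--         visited.add(current)
--         for neighbor in reverse_graph.get(current, []):
--             if neighbor not in visited:
--                 queue.append(neighbor)
--     return visited
-- ===== SOURCE B (Python) =====
-- def _bfs_backward(start_ids: set, reverse_graph: dict) -> set:
--     # Layered (frontier-at-a-time) BFS with set algebra instead of a per-node deque.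
--     visited = set(start_ids)
--     frontier = set(start_ids)
--     while frontier:
--         next_frontier = set()
--         for node in frontier:
--             next_frontier.update(reverse_graph.get(node, []))
--         frontier = next_frontier - visited
--         visited |= frontier
--     return visited
-- ===== Notes on version B (the rewrite author's own statement) =====
-- stated objective: alternative
-- what changed: Replaces the per-node deque BFS (pop one node, check visited, push unvisited neighbors) with a layered BFS that expands a whole frontier set at a time using set union and difference.
import Mathlib
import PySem

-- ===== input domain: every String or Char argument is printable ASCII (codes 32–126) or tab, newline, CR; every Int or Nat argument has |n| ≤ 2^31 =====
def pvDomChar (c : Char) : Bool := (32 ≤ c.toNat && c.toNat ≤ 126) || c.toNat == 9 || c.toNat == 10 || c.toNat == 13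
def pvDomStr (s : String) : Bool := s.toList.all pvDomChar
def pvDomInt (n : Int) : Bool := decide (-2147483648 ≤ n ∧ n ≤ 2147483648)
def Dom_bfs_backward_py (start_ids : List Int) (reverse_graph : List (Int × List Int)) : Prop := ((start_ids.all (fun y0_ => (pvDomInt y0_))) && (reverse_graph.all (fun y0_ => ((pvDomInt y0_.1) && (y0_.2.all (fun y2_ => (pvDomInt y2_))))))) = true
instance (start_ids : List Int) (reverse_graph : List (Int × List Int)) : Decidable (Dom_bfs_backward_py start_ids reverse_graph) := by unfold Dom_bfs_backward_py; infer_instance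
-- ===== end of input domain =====

-- B replaces A's per-node deque BFS by a layered (whole-frontier-at-a-time) BFS using set
-- union/difference; same reachable set, stated objective: alternative (no speed claim).
-- Both Pythons take/return Python sets; per the convention sets are lists of distinct elements
-- and outputs are compared as finite sets, so the set-iteration order of Python is immaterial.

-- ===== PORT A =====
-- reverse_graph.get(current, []): dict → assoc list, lookup = first match
def pvNbrs (g : List (Int × List Int)) (c : Int) : List Int :=
  ((g.find? (fun p => p.1 == c)).map Prod.snd).getD []

-- pvU/pvE: termination scaffolding only (all values appearing in the graph, and their count)
def pvU (g : List (Int × List Int)) : List Int := g.flatMap Prod.snd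
def pvE (g : List (Int × List Int)) : Nat := (g.flatMap Prod.snd).length

theorem pvNbrs_mem_U {g : List (Int × List Int)} {c x : Int} (h : x ∈ pvNbrs g c) : x ∈ pvU g := by
  unfold pvNbrs at h
  cases hf : g.find? (fun p => p.1 == c) with
  | none => rw [hf] at h; simp at h
  | some p =>
    rw [hf] at h; simp at h
    exact List.mem_flatMap.mpr ⟨p, List.mem_of_find?_eq_some hf, h⟩

theorem pvNbrs_len {g : List (Int × List Int)} (c : Int) : (pvNbrs g c).length ≤ pvE g := by
  unfold pvNbrs pvE
  cases hf : g.find? (fun p => p.1 == c) with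
  | none => simp
  | some p =>
    simp only [Option.map_some, Option.getD_some]
    have hp := List.mem_of_find?_eq_some hf
    clear hf
    induction g with
    | nil => simp at hp
    | cons q g ih =>
      simp only [List.flatMap_cons, List.length_append]
      rcases List.mem_cons.mp hp with h | h
      · subst h; omega
      · have := ih h; omega

-- measure for loopA: potential of unvisited graph values, queue length, and off-graph queue entries
def pvMeasA (g : List (Int × List Int)) (v q : List Int) : Nat :=
  ((pvU g).toFinset \ v.toFinset).card * (pvE g + 1) + q.length
    + (q.filter (fun x => decide (x ∉ pvU g))).length * (pvE g + 1)

theorem pvCard_mono {g : List (Int × List Int)} (v : List Int) (c : Int) :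
    (((pvU g).toFinset \ (v ++ [c]).toFinset).card) ≤ ((pvU g).toFinset \ v.toFinset).card := by
  apply Finset.card_le_card
  apply Finset.sdiff_subset_sdiff (Finset.Subset.refl _)
  intro x hx; simp at hx ⊢; tauto

theorem pvCard_lt {g : List (Int × List Int)} {v : List Int} {c : Int}
    (hU : c ∈ pvU g) (hv : c ∉ v) :
    (((pvU g).toFinset \ (v ++ [c]).toFinset).card) < ((pvU g).toFinset \ v.toFinset).card := by
  apply Finset.card_lt_card
  constructor
  · apply Finset.sdiff_subset_sdiff (Finset.Subset.refl _)
    intro x hx; simp at hx ⊢; tauto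
  · intro hsub
    have h1 : c ∈ (pvU g).toFinset \ v.toFinset := by simp [hU, hv]
    have h2 := hsub h1
    simp at h2

theorem pvCard_lt' {g : List (Int × List Int)} {v v' : List Int} {x : Int}
    (hsub : ∀ y, y ∈ v → y ∈ v') (hU : x ∈ pvU g) (hv : x ∉ v) (hv' : x ∈ v') :
    ((pvU g).toFinset \ v'.toFinset).card < ((pvU g).toFinset \ v.toFinset).card := by
  apply Finset.card_lt_card
  constructor
  · apply Finset.sdiff_subset_sdiff (Finset.Subset.refl _)
    intro y hy; simp at hy ⊢; exact hsub y hy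
  · intro hsubc
    have h1 : x ∈ (pvU g).toFinset \ v.toFinset := by simp [hU, hv]
    have h2 := hsubc h1
    simp [hv'] at h2

-- the loop of A: FIFO queue, skip visited, append unvisited neighbors
def loopA (g : List (Int × List Int)) (visited queue : List Int) : List Int :=
  match queue with
  | [] => visited
  | c :: qs =>
    if c ∈ visited then
      loopA g visited qs
    else
      loopA g (visited ++ [c])
        (qs ++ (pvNbrs g c).filter (fun x => decide (x ∉ visited ++ [c])))
termination_by pvMeasA g visited queue
decreasing_by
  · unfold pvMeasA
    have h1 : (qs.filter (fun x => decide (x ∉ pvU g))).length ≤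
        ((c :: qs).filter (fun x => decide (x ∉ pvU g))).length := by
      simp only [List.filter_cons]; split <;> simp
    have h2 := Nat.mul_le_mul_right (pvE g + 1) h1
    simp only [List.length_cons]
    omega
  · unfold pvMeasA
    have happlen : ((pvNbrs g c).filter (fun x => decide (x ∉ visited ++ [c]))).length ≤ pvE g :=
      le_trans (List.length_filter_le _ _) (pvNbrs_len c)
    have happbad : (((pvNbrs g c).filter (fun x => decide (x ∉ visited ++ [c]))).filter
        (fun x => decide (x ∉ pvU g))).length = 0 := by
      rw [List.length_eq_zero_iff, List.filter_eq_nil_iff]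
      intro x hx
      have := pvNbrs_mem_U (List.mem_of_mem_filter hx)
      simp [this]
    rw [List.filter_append, List.length_append, List.length_append, happbad]
    simp only [List.filter_cons, List.length_cons]
    by_cases hU : c ∈ pvU g
    · have hlt := pvCard_lt (g := g) hU (by assumption)
      have hmul : (((pvU g).toFinset \ (visited ++ [c]).toFinset).card + 1) * (pvE g + 1) ≤
          ((pvU g).toFinset \ visited.toFinset).card * (pvE g + 1) :=
        Nat.mul_le_mul_right _ hlt
      rw [Nat.add_mul] at hmul
      have hbadc : (decide (c ∉ pvU g)) = false := by simp [hU]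
      rw [hbadc]
      simp only [Bool.false_eq_true, if_false, Nat.add_zero]
      omega
    · have hle := pvCard_mono (g := g) visited c
      have hmul := Nat.mul_le_mul_right (pvE g + 1) hle
      have hbadc : (decide (c ∉ pvU g)) = true := by simp [hU]
      rw [hbadc]
      simp only [if_true, List.length_cons, Nat.add_mul, Nat.add_zero]
      omega

def bfs_backward_py (start_ids : List Int) (reverse_graph : List (Int × List Int)) : List Int :=
  loopA reverse_graph [] start_ids

-- ===== PORT B =====
-- next_frontier loop: for node in frontier: next_frontier.update(reverse_graph.get(node, []))
def pvExpand (g : List (Int × List Int)) (frontier : List Int) : List Int :=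
  PySem.Set.ofList (frontier.flatMap (pvNbrs g))

-- the loop of B: expand the whole frontier, subtract visited, union into visited
def loopB (g : List (Int × List Int)) (visited frontier : List Int) : List Int :=
  if frontier.isEmpty then visited
  else
    let next := pvExpand g frontier                              -- next_frontier.update(...)
    let newF := PySem.Set.diff next visited                      -- next_frontier - visited
    loopB g (PySem.Set.union visited newF) newF                  -- visited |= new; frontier = new
termination_by ((pvU g).toFinset \ visited.toFinset).card * 2 + (if frontier.isEmpty then 0 else 1)
decreasing_by
  rename_i hne
  by_cases hnew : PySem.Set.diff (pvExpand g frontier) visited = []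
  · simp only [hnew]
    have hu : PySem.Set.union visited ([] : List Int) = visited := rfl
    rw [hu]
    simp [hne]
  · rcases List.exists_mem_of_ne_nil _ hnew with ⟨x, hx⟩
    have hx' := (PySem.Set.mem_diff _ _ _).mp hx
    have hxU : x ∈ pvU g := by
      rcases List.mem_flatMap.mp ((PySem.Set.mem_ofList _ _).mp hx'.1) with ⟨c, _, hxc⟩
      exact pvNbrs_mem_U hxc
    have hlt := pvCard_lt' (g := g) (v := visited)
      (v' := PySem.Set.union visited (PySem.Set.diff (pvExpand g frontier) visited))
      (fun y hy => (PySem.Set.mem_union _ _ _).mpr (Or.inl hy)) hxU hx'.2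
      ((PySem.Set.mem_union _ _ _).mpr (Or.inr hx))
    have h0 : (if frontier.isEmpty = true then 0 else 1) = 1 := by simp [hne]
    have h1 : (PySem.Set.diff (pvExpand g frontier) visited).isEmpty = false := by
      simp [hnew]
    rw [h0]
    simp only [h1, Bool.false_eq_true, if_false]
    omega

def bfs_backward_py_alt (start_ids : List Int) (reverse_graph : List (Int × List Int)) : List Int :=
  let visited := PySem.Set.ofList start_ids
  loopB reverse_graph visited visited

-- ===== PRECONDITION & SPEC =====
def Spec_bfs_backward_py (start_ids : List Int) (reverse_graph : List (Int × List Int)) (out : List Int) : Prop := out = bfs_backward_py_alt start_ids reverse_graph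
instance (start_ids : List Int) (reverse_graph : List (Int × List Int)) (out : List Int) : Decidable (Spec_bfs_backward_py start_ids reverse_graph out) := by unfold Spec_bfs_backward_py; infer_instance

-- ===== CLAIM (what is proved, stated in full; the proofs are below) =====
def Claim_equal_bfs_backward_py : Prop := ∀ (start_ids : List Int) (reverse_graph : List (Int × List Int)), Dom_bfs_backward_py start_ids reverse_graph → Spec_bfs_backward_py start_ids reverse_graph (bfs_backward_py start_ids reverse_graph)

-- ===== LEMMAS AND PROOFS =====

-- first-occurrence nodes of q that are not yet in v (the canonical frontier)
def pvFresh : List Int → List Int → List Int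
  | _, [] => []
  | v, c :: q => if c ∈ v then pvFresh v q else c :: pvFresh (v ++ [c]) q

-- the result of A processing a whole frontier F: (new visited, appended queue)
def pvProcF (g : List (Int × List Int)) : List Int → List Int → List Int × List Int
  | v, [] => (v, [])
  | v, c :: q =>
    if c ∈ v then pvProcF g v q
    else
      let r := pvProcF g (v ++ [c]) q
      (r.1, (pvNbrs g c).filter (fun x => decide (x ∉ v ++ [c])) ++ r.2)

theorem unfoldA (g : List (Int × List Int)) :
    ∀ (F v R : List Int), loopA g v (F ++ R) = loopA g (pvProcF g v F).1 (R ++ (pvProcF g v F).2) := by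
  intro F
  induction F with
  | nil => intro v R; simp [pvProcF]
  | cons c F ih =>
    intro v R
    rw [List.cons_append, loopA]
    by_cases h : c ∈ v
    · rw [if_pos h, ih v R]
      simp [pvProcF, h]
    · rw [if_neg h, List.append_assoc, ih (v ++ [c])]
      simp only [pvProcF, if_neg h]
      rw [List.append_assoc]

theorem procF_fst (g : List (Int × List Int)) :
    ∀ (q v : List Int), (pvProcF g v q).1 = v ++ pvFresh v q := by
  intro q
  induction q with
  | nil => intro v; simp [pvProcF, pvFresh]
  | cons c q ih =>
    intro v
    by_cases h : c ∈ v
    · simp [pvProcF, pvFresh, h, ih]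
    · simp [pvProcF, pvFresh, h, ih]

theorem procF_snd_mem_U (g : List (Int × List Int)) :
    ∀ (q v : List Int) (x : Int), x ∈ (pvProcF g v q).2 → x ∈ pvU g := by
  intro q
  induction q with
  | nil => intro v x hx; simp [pvProcF] at hx
  | cons c q ih =>
    intro v x hx
    by_cases h : c ∈ v
    · simp only [pvProcF, if_pos h] at hx
      exact ih v x hx
    · simp only [pvProcF, if_neg h, List.mem_append] at hx
      rcases hx with hx | hx
      · exact pvNbrs_mem_U (List.mem_of_mem_filter hx)
      · exact ih (v ++ [c]) x hx

theorem fresh_nil (g : List (Int × List Int)) :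
    ∀ (q v : List Int), pvFresh v q = [] → pvProcF g v q = (v, []) := by
  intro q
  induction q with
  | nil => intro v _; rfl
  | cons c q ih =>
    intro v hf
    by_cases h : c ∈ v
    · simp only [pvFresh, if_pos h] at hf
      simp only [pvProcF, if_pos h]
      exact ih v hf
    · simp [pvFresh, if_neg h] at hf

theorem fresh_mem : ∀ (q v : List Int) (x : Int), x ∈ pvFresh v q → x ∈ q ∧ x ∉ v := by
  intro q
  induction q with
  | nil => intro v x hx; simp [pvFresh] at hx
  | cons c q ih =>
    intro v x hx
    by_cases h : c ∈ v
    · rw [pvFresh, if_pos h] at hx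
      have := ih v x hx
      exact ⟨List.mem_cons_of_mem _ this.1, this.2⟩
    · rw [pvFresh, if_neg h] at hx
      rcases List.mem_cons.mp hx with rfl | hx
      · exact ⟨List.mem_cons_self, h⟩
      · have := ih (v ++ [c]) x hx
        refine ⟨List.mem_cons_of_mem _ this.1, fun hv => this.2 ?_⟩
        exact List.mem_append.mpr (Or.inl hv)

theorem procF_snd_filter (g : List (Int × List Int)) :
    ∀ (q v w : List Int), (∀ x, x ∈ v → x ∈ w) → (∀ x, x ∈ pvFresh v q → x ∈ w) →
      ((pvProcF g v q).2).filter (fun x => decide (x ∉ w))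
        = ((pvFresh v q).flatMap (pvNbrs g)).filter (fun x => decide (x ∉ w)) := by
  intro q
  induction q with
  | nil => intro v w _ _; simp [pvProcF, pvFresh]
  | cons c q ih =>
    intro v w hv hf
    by_cases h : c ∈ v
    · rw [show pvProcF g v (c :: q) = pvProcF g v q from by rw [pvProcF, if_pos h],
          show pvFresh v (c :: q) = pvFresh v q from by rw [pvFresh, if_pos h]]
      exact ih v w hv (fun x hx => hf x (by rw [pvFresh, if_pos h]; exact hx))
    · have hcw : c ∈ w := hf c (by rw [pvFresh, if_neg h]; exact List.mem_cons_self)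
      simp only [pvProcF, pvFresh, if_neg h]
      rw [List.filter_append, List.flatMap_cons, List.filter_append]
      congr 1
      · rw [List.filter_filter]
        apply List.filter_congr
        intro a _
        by_cases haw : a ∈ w
        · simp [haw]
        · have hav : a ∉ v ++ [c] := by
            intro hav
            rcases List.mem_append.mp hav with h1 | h1
            · exact haw (hv a h1)
            · simp at h1; subst h1; exact haw hcw
          simp [haw, hav]
      · apply ih (v ++ [c]) w
        · intro x hx
          rcases List.mem_append.mp hx with h1 | h1
          · exact hv x h1
          · simp at h1; subst h1; exact hcw
        · intro x hx
          exact hf x (by rw [pvFresh, if_neg h]; exact List.mem_cons_of_mem _ hx)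

theorem fresh_eq_ofList_filter :
    ∀ (l v : List Int), pvFresh v l = (PySem.Set.ofList l).filter (fun x => decide (x ∉ v)) := by
  intro l
  induction l with
  | nil => intro v; rfl
  | cons c l ih =>
    intro v
    rw [PySem.Set.ofList_cons]
    by_cases h : c ∈ v
    · rw [List.filter_cons_of_neg (by simp [h])]
      rw [pvFresh, if_pos h, ih v]
      show _ = List.filter _ (List.filter (fun y => !(y == c)) _)
      rw [List.filter_filter]
      apply List.filter_congr
      intro a _
      by_cases hac : a = c
      · subst hac; simp [h]
      · simp [hac]
    · rw [List.filter_cons_of_pos (by simp [h])]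
      rw [pvFresh, if_neg h, ih (v ++ [c])]
      congr 1
      show _ = List.filter _ (List.filter (fun y => !(y == c)) _)
      rw [List.filter_filter]
      apply List.filter_congr
      intro a _
      by_cases hac : a = c
      · subst hac; simp
      · simp [hac, List.mem_append]

theorem ofList_filter_comm :
    ∀ (l : List Int) (p : Int → Bool), (PySem.Set.ofList l).filter p = PySem.Set.ofList (l.filter p) := by
  intro l p
  induction l with
  | nil => rfl
  | cons x l ih =>
    rw [PySem.Set.ofList_cons]
    by_cases hp : p x
    · rw [List.filter_cons_of_pos hp, List.filter_cons_of_pos hp, PySem.Set.ofList_cons]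
      congr 1
      rw [← ih]
      show List.filter p (List.filter (fun y => !(y == x)) _) = List.filter (fun y => !(y == x)) (List.filter p _)
      rw [List.filter_filter, List.filter_filter]
      exact List.filter_congr (fun a _ => Bool.and_comm _ _)
    · have hp' : p x = false := by revert hp; cases p x <;> simp
      rw [List.filter_cons_of_neg (by simp [hp']), List.filter_cons_of_neg (by simp [hp']), ← ih]
      show List.filter p (List.filter (fun y => !(y == x)) _) = _
      rw [List.filter_filter]
      apply List.filter_congr
      intro a _
      by_cases hax : a = x
      · subst hax; simp [hp']
      · simp [hax]

theorem diff_eq_fresh_filter (s v : List Int) :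
    PySem.Set.diff s v = s.filter (fun x => decide (x ∉ v)) := by
  show s.filter _ = _
  apply List.filter_congr
  intro a _
  by_cases h : a ∈ v <;> simp [PySem.Set.contains, h]

theorem union_eq_append (v newF : List Int) (hnd : newF.Nodup) (hdisj : ∀ x ∈ newF, x ∉ v) :
    PySem.Set.union v newF = v ++ newF := by
  rw [show PySem.Set.union v newF = PySem.Set.update v newF from rfl,
      PySem.Set.update_eq_append_filter, PySem.Set.ofList_eq_self_of_nodup _ hnd]
  congr 1
  apply List.filter_eq_self.mpr
  intro a ha
  simp [PySem.Set.contains, hdisj a ha]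

theorem mainL (g : List (Int × List Int)) :
    ∀ (n : Nat) (v q : List Int),
      (((pvU g).toFinset ∪ q.toFinset) \ v.toFinset).card ≤ n →
      loopA g v q = loopB g (v ++ pvFresh v q) (pvFresh v q) := by
  have base : ∀ (v q : List Int), pvFresh v q = [] →
      loopA g v q = loopB g (v ++ pvFresh v q) (pvFresh v q) := by
    intro v q hf
    have h1 := unfoldA g q v []
    rw [List.append_nil, fresh_nil g q v hf] at h1
    rw [h1, hf, List.append_nil, loopA, loopB]
    simp
  intro n
  induction n with
  | zero =>
    intro v q hcard
    by_cases hf : pvFresh v q = []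
    · exact base v q hf
    · exfalso
      rcases List.exists_mem_of_ne_nil _ hf with ⟨c, hc⟩
      have hcm := fresh_mem q v c hc
      have : c ∈ ((pvU g).toFinset ∪ q.toFinset) \ v.toFinset := by
        simp [hcm.1, hcm.2]
      have := Finset.card_pos.mpr ⟨c, this⟩
      omega
  | succ m ih =>
    intro v q hcard
    by_cases hf : pvFresh v q = []
    · exact base v q hf
    · rcases List.exists_mem_of_ne_nil _ hf with ⟨c, hc⟩
      have hcm := fresh_mem q v c hc
      -- A processes the whole queue as one layer
      have hA := unfoldA g q v []
      rw [List.append_nil, List.nil_append, procF_fst] at hA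
      set f := pvFresh v q with hfdef
      set v₁ := v ++ f with hv1def
      set app := (pvProcF g v q).2 with happdef
      -- the appended queue lies in the graph values
      have happU : ∀ x ∈ app, x ∈ pvU g := fun x hx => procF_snd_mem_U g q v x hx
      -- measure decreases
      have hsub : (pvU g).toFinset \ v₁.toFinset ⊂ ((pvU g).toFinset ∪ q.toFinset) \ v.toFinset := by
        constructor
        · intro x hx
          simp only [Finset.mem_sdiff, Finset.mem_union, List.mem_toFinset] at hx ⊢
          exact ⟨Or.inl hx.1, fun hxv => hx.2 (List.mem_append.mpr (Or.inl hxv))⟩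
        · intro hs
          have h1 : c ∈ ((pvU g).toFinset ∪ q.toFinset) \ v.toFinset := by
            simp [hcm.1, hcm.2]
          have h2 := hs h1
          simp only [Finset.mem_sdiff, List.mem_toFinset] at h2
          exact h2.2 (List.mem_append.mpr (Or.inr hc))
      have hcard2 : (((pvU g).toFinset ∪ app.toFinset) \ v₁.toFinset).card ≤ m := by
        have hUapp : (pvU g).toFinset ∪ app.toFinset = (pvU g).toFinset := by
          apply Finset.union_eq_left.mpr
          intro x hx
          exact List.mem_toFinset.mpr (happU x (List.mem_toFinset.mp hx))
        rw [hUapp]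
        have := Finset.card_lt_card hsub
        omega
      have hIH := ih v₁ app hcard2
      -- the two next frontiers coincide
      have hfr : pvFresh v₁ app = pvFresh v₁ (f.flatMap (pvNbrs g)) := by
        rw [fresh_eq_ofList_filter, fresh_eq_ofList_filter, ofList_filter_comm, ofList_filter_comm]
        congr 1
        exact procF_snd_filter g q v v₁
          (fun x hx => List.mem_append.mpr (Or.inl hx))
          (fun x hx => List.mem_append.mpr (Or.inr hx))
      -- unfold one step of loopB on the right
      have hBne : f.isEmpty = false := by
        simp [hf]
      have hdiff : PySem.Set.diff (pvExpand g f) v₁ = pvFresh v₁ (f.flatMap (pvNbrs g)) := by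
        rw [diff_eq_fresh_filter, pvExpand, ← fresh_eq_ofList_filter]
      have hnd : (pvFresh v₁ (f.flatMap (pvNbrs g))).Nodup := by
        rw [fresh_eq_ofList_filter]
        exact (PySem.Set.nodup_ofList _).filter _
      have hdisj : ∀ x ∈ pvFresh v₁ (f.flatMap (pvNbrs g)), x ∉ v₁ :=
        fun x hx => (fresh_mem _ _ _ hx).2
      have hB : loopB g v₁ f = loopB g (v₁ ++ pvFresh v₁ (f.flatMap (pvNbrs g)))
          (pvFresh v₁ (f.flatMap (pvNbrs g))) := by
        rw [loopB, if_neg (by rw [hBne]; simp)]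
        show loopB g (PySem.Set.union v₁ (PySem.Set.diff (pvExpand g f) v₁))
            (PySem.Set.diff (pvExpand g f) v₁) = _
        rw [hdiff, union_eq_append _ _ hnd hdisj]
      rw [hA, hIH, hfr, hB]

-- ===== VERDICT (by name: the statement is the Claim_ definition above) =====
theorem bfs_backward_py_spec : Claim_equal_bfs_backward_py := by
  intro s g _
  unfold Spec_bfs_backward_py bfs_backward_py bfs_backward_py_alt
  have h := mainL g ((((pvU g).toFinset ∪ s.toFinset) \ ([] : List Int).toFinset).card) [] s le_rfl
  rw [h]
  have hf : pvFresh [] s = PySem.Set.ofList s := by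
    rw [fresh_eq_ofList_filter]; simp
  rw [hf]; simp
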